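-- pv_equiv track=rewrite | github.com/FernandoCarpioo/Gen | gen.py | formar_parejas
-- ===== SOURCE A (Python) =====
-- UPPER = 9
--
-- def obtener_ancestros(ind_id, genealogia, nivel):
--
--     if nivel == 0 or ind_id not in genealogia:
--         return set()
--
--     ancestros = set()
--     for padre_id in genealogia[ind_id]:
--         ancestros.add(padre_id)
--         ancestros |= obtener_ancestros(padre_id, genealogia, nivel - 1)
--
--     return ancestros
--
-- def son_familiares(ind1, ind2, genealogia):
--     id1, id2 = ind1[1], ind2[1]
--     # Si son el mismo individuo
--     if id1 == id2:
--         return True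
--
--     # Obtener ancestros hasta, primos terceros
--     ancestros1 = obtener_ancestros(id1, genealogia, 3)
--     ancestros2 = obtener_ancestros(id2, genealogia, 3)
--
--     # Si comparten algún ancestro en común, son familiares
--     return len(ancestros1.intersection(ancestros2)) > 0
--
-- def seleccionar_mejores_padres(population, num_parejas):
--
--     population_ordenada = sorted(population, key=lambda ind: (sum(ind[0]), ind[0].count(UPPER)), reverse=True)
--     # Seleccionar los mejores para reproducirse
--     mejores = population_ordenada[:num_parejas*2]
--     parejas = []
--     for i in range(0, len(mejores), 2):
--         if i+1 < len(mejores):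
--             parejas.append((mejores[i], mejores[i+1]))
--
--     return parejas
--
-- def formar_parejas(population, genealogia):
--     num_parejas = len(population) // 2
--     parejas = seleccionar_mejores_padres(population, num_parejas)
--
--     # Verificar que no sean familiares
--     parejas_no_familiares = []
--     usados = set()
--
--     for i, (ind1, ind2) in enumerate(parejas):
--         idx1 = population.index(ind1)
--         idx2 = population.index(ind2)
--         if not son_familiares(ind1, ind2, genealogia) and idx1 not in usados and idx2 not in usados:
--             parejas_no_familiares.append((ind1, ind2))
--             usados.add(idx1)
--             usados.add(idx2)
--
--     if len(parejas_no_familiares) < num_parejas: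
--         disponibles = [i for i in range(len(population)) if i not in usados]
--
--         for i in disponibles:
--             if i in usados:
--                 continue
--             for j in disponibles:
--                 if j in usados or i == j:
--                     continue
--                 if not son_familiares(population[i], population[j], genealogia):
--                     parejas_no_familiares.append((population[i], population[j]))
--                     usados.add(i)
--                     usados.add(j)
--                     break
--     return parejas_no_familiares
-- ===== SOURCE B (Python) =====
-- UPPER = 9
--
-- def formar_parejas(population, genealogia):
--     # 3-level ancestors computed iteratively (frontier expansion) and memoized
--     # once per individual id, instead of A's per-pair recursive recomputation.
--     def ancestros3(ind_id):
--         res = set()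
--         frontier = genealogia.get(ind_id, [])
--         for _ in range(3):
--             nxt = []
--             for f in frontier:
--                 res.add(f)
--                 nxt.extend(genealogia.get(f, []))
--             frontier = nxt
--         return res
--
--     anc = {}
--     for ind in population:
--         anc[ind[1]] = ancestros3(ind[1])
--
--     def familiares(a, b):
--         return a[1] == b[1] or any(x in anc[b[1]] for x in anc[a[1]])
--
--     num_parejas = len(population) // 2
--     mejores = sorted(population,
--                      key=lambda ind: (sum(ind[0]), ind[0].count(UPPER)),
--                      reverse=True)[:num_parejas * 2]
--     it = iter(mejores)
--     parejas = list(zip(it, it))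
--
--     resultado = []
--     usados = set()
--     for ind1, ind2 in parejas:
--         idx1 = population.index(ind1)
--         idx2 = population.index(ind2)
--         if idx1 not in usados and idx2 not in usados and not familiares(ind1, ind2):
--             resultado.append((ind1, ind2))
--             usados.update((idx1, idx2))
--
--     if len(resultado) < num_parejas:
--         disponibles = [i for i in range(len(population)) if i not in usados]
--         for i in disponibles:
--             if i in usados:
--                 continue
--             j = next((j for j in disponibles
--                       if j not in usados and j != i
--                       and not familiares(population[i], population[j])), None)
--             if j is not None:
--                 resultado.append((population[i], population[j]))
--                 usados.update((i, j))
--     return resultado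
-- ===== Notes on version B (the rewrite author's own statement) =====
-- stated objective: alternative
-- what changed: The recursive per-pair depth-3 ancestor computation is replaced by an iterative frontier expansion computed once per individual id and memoized in a dict, relatedness becomes an any-membership test on the memoized sets instead of counting a set intersection, pairing uses iterator chunking (zip(it,it)) instead of an index range loop, and the fallback partner search is a find-first expression instead of a nested loop with break.
import Mathlib
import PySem

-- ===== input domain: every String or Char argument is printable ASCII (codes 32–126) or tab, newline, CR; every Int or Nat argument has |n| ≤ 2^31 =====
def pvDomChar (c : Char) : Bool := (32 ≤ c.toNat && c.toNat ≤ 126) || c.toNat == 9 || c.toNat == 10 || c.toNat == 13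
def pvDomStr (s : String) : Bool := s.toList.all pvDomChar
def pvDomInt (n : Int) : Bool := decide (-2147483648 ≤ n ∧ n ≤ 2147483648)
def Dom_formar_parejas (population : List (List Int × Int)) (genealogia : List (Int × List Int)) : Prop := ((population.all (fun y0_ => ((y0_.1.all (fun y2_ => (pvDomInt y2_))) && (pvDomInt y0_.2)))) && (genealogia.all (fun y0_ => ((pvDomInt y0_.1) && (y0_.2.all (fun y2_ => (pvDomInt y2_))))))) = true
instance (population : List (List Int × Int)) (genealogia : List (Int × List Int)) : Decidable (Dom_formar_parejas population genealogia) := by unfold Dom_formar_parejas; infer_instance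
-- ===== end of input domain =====

-- B replaces A's per-pair recursive depth-3 ancestor computation by an iterative
-- frontier expansion memoized once per individual id in a dict, an any-membership
-- relatedness test, iterator-style pairing and a find-first fallback search (alternative).

-- ===== PORT A =====
-- Python's `obtener_ancestros(ind_id, genealogia, nivel)`; the recursion depth is a Nat (here always 3)
def obtener_ancestros (genealogia : List (Int × List Int)) : Nat → Int → PySem.Set Int
  | 0, _ => PySem.Set.empty
  | nivel + 1, ind_id =>
    if (PySem.Dict.mk genealogia).contains ind_id then
      ((PySem.Dict.mk genealogia).getD ind_id []).foldl
        (fun ancestros padre =>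
          PySem.Set.union (PySem.Set.add ancestros padre)
            (obtener_ancestros genealogia nivel padre))
        PySem.Set.empty
    else PySem.Set.empty

def son_familiares (ind1 ind2 : List Int × Int) (genealogia : List (Int × List Int)) : Bool :=
  if ind1.2 == ind2.2 then true
  else
    let ancestros1 := obtener_ancestros genealogia 3 ind1.2
    let ancestros2 := obtener_ancestros genealogia 3 ind2.2
    decide (0 < PySem.List.len (PySem.Set.inter ancestros1 ancestros2))

def seleccionar_mejores_padres (population : List (List Int × Int)) (num_parejas : Int) :
    List ((List Int × Int) × (List Int × Int)) :=
  let population_ordenada := PySem.List.sorted2 population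
    (fun ind => ind.1.sum) (fun ind => (PySem.List.count ind.1 9 : Int)) true
  let mejores := PySem.List.slice population_ordenada none (some (num_parejas * 2))
  (PySem.List.pyRange 0 (PySem.List.len mejores) 2).foldl
    (fun parejas i =>
      if i + 1 < PySem.List.len mejores then
        parejas ++ [(PySem.List.pyGetD mejores i ([], 0), PySem.List.pyGetD mejores (i + 1) ([], 0))]
      else parejas) []

-- the inner `for j in disponibles: … break` loop of A's fallback pass
def buscar_pareja_A (population : List (List Int × Int)) (genealogia : List (Int × List Int))
    (usados : PySem.Set Int) (i : Int) : List Int → Option Int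
  | [] => none
  | j :: rest =>
    if PySem.Set.contains usados j || i == j then
      buscar_pareja_A population genealogia usados i rest
    else if !(son_familiares (PySem.List.pyGetD population i ([], 0))
        (PySem.List.pyGetD population j ([], 0)) genealogia) then some j
    else buscar_pareja_A population genealogia usados i rest

def formar_parejas (population : List (List Int × Int)) (genealogia : List (Int × List Int)) :
    List ((List Int × Int) × (List Int × Int)) :=
  let num_parejas := PySem.Int.floordiv (PySem.List.len population) 2
  let parejas := seleccionar_mejores_padres population num_parejas
  let paso1 := (PySem.List.enumerate parejas 0).foldl
    (fun (st : List ((List Int × Int) × (List Int × Int)) × PySem.Set Int) ip =>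
      let ind1 := ip.2.1
      let ind2 := ip.2.2
      let idx1 : Int := ((PySem.List.index? population ind1).getD 0 : Nat)
      let idx2 : Int := ((PySem.List.index? population ind2).getD 0 : Nat)
      if !(son_familiares ind1 ind2 genealogia) && !(PySem.Set.contains st.2 idx1) &&
          !(PySem.Set.contains st.2 idx2) then
        (st.1 ++ [(ind1, ind2)], PySem.Set.add (PySem.Set.add st.2 idx1) idx2)
      else st)
    ([], PySem.Set.empty)
  if PySem.List.len paso1.1 < num_parejas then
    let disponibles := (PySem.List.pyRange 0 (PySem.List.len population) 1).filter
      (fun i => !(PySem.Set.contains paso1.2 i))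
    (disponibles.foldl
      (fun (st : List ((List Int × Int) × (List Int × Int)) × PySem.Set Int) i =>
        if PySem.Set.contains st.2 i then st
        else
          match buscar_pareja_A population genealogia st.2 i disponibles with
          | some j =>
            (st.1 ++ [(PySem.List.pyGetD population i ([], 0), PySem.List.pyGetD population j ([], 0))],
             PySem.Set.add (PySem.Set.add st.2 i) j)
          | none => st)
      paso1).1
  else paso1.1

-- ===== PORT B =====
-- iterative 3-round frontier expansion over the parent lists
def ancestros3_alt (genealogia : List (Int × List Int)) (ind_id : Int) : PySem.Set Int :=
  ((List.range 3).foldl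
    (fun (st : PySem.Set Int × List Int) _ =>
      st.2.foldl
        (fun (p : PySem.Set Int × List Int) f =>
          (PySem.Set.add p.1 f, p.2 ++ (PySem.Dict.mk genealogia).getD f []))
        (st.1, []))
    (PySem.Set.empty, (PySem.Dict.mk genealogia).getD ind_id [])).1

def familiares_alt (anc : PySem.Dict Int (PySem.Set Int)) (a b : List Int × Int) : Bool :=
  a.2 == b.2 ||
    (PySem.Dict.getD anc a.2 []).any (fun x => PySem.Set.contains (PySem.Dict.getD anc b.2 []) x)

-- list(zip(it, it)) on the same iterator: consecutive disjoint pairs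
def chunk2 {α : Type} : List α → List (α × α)
  | a :: b :: t => (a, b) :: chunk2 t
  | _ => []

def formar_parejas_alt (population : List (List Int × Int)) (genealogia : List (Int × List Int)) :
    List ((List Int × Int) × (List Int × Int)) :=
  let anc := population.foldl
    (fun d ind => PySem.Dict.insert d ind.2 (ancestros3_alt genealogia ind.2)) PySem.Dict.empty
  let num_parejas := PySem.Int.floordiv (PySem.List.len population) 2
  let mejores := PySem.List.slice
    (PySem.List.sorted2 population (fun ind => ind.1.sum)
      (fun ind => (PySem.List.count ind.1 9 : Int)) true) none (some (num_parejas * 2))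
  let parejas := chunk2 mejores
  let paso1 := parejas.foldl
    (fun (st : List ((List Int × Int) × (List Int × Int)) × PySem.Set Int) p =>
      let idx1 : Int := ((PySem.List.index? population p.1).getD 0 : Nat)
      let idx2 : Int := ((PySem.List.index? population p.2).getD 0 : Nat)
      if !(PySem.Set.contains st.2 idx1) && !(PySem.Set.contains st.2 idx2) &&
          !(familiares_alt anc p.1 p.2) then
        (st.1 ++ [p], PySem.Set.add (PySem.Set.add st.2 idx1) idx2)
      else st)
    ([], PySem.Set.empty)
  if PySem.List.len paso1.1 < num_parejas then
    let disponibles := (PySem.List.pyRange 0 (PySem.List.len population) 1).filter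
      (fun i => !(PySem.Set.contains paso1.2 i))
    (disponibles.foldl
      (fun (st : List ((List Int × Int) × (List Int × Int)) × PySem.Set Int) i =>
        if PySem.Set.contains st.2 i then st
        else
          match disponibles.find? (fun j => !(PySem.Set.contains st.2 j) && j != i &&
              !(familiares_alt anc (PySem.List.pyGetD population i ([], 0))
                (PySem.List.pyGetD population j ([], 0)))) with
          | some j =>
            (st.1 ++ [(PySem.List.pyGetD population i ([], 0), PySem.List.pyGetD population j ([], 0))],
             PySem.Set.add (PySem.Set.add st.2 i) j)
          | none => st)
      paso1).1
  else paso1.1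

-- ===== PRECONDITION & SPEC =====
def Spec_formar_parejas (population : List (List Int × Int)) (genealogia : List (Int × List Int)) (out : List ((List Int × Int) × (List Int × Int))) : Prop := out = formar_parejas_alt population genealogia
instance (population : List (List Int × Int)) (genealogia : List (Int × List Int)) (out : List ((List Int × Int) × (List Int × Int))) : Decidable (Spec_formar_parejas population genealogia out) := by unfold Spec_formar_parejas; infer_instance

-- ===== CLAIM (what is proved, stated in full; the proofs are below) =====
def Claim_equal_formar_parejas : Prop := ∀ (population : List (List Int × Int)) (genealogia : List (Int × List Int)), Dom_formar_parejas population genealogia → Spec_formar_parejas population genealogia (formar_parejas population genealogia)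

-- ===== LEMMAS AND PROOFS =====

-- parent list of an id (the genealogy lookup with default [])
def pvPar (g : List (Int × List Int)) (id : Int) : List Int := (PySem.Dict.mk g).getD id []

theorem pv_mem_foldl_union_add (g : List (Int × List Int)) (n : Nat) (ps : List Int)
    (s0 : PySem.Set Int) (x : Int) :
    x ∈ ps.foldl (fun anc p => PySem.Set.union (PySem.Set.add anc p)
        (obtener_ancestros g n p)) s0 ↔
      x ∈ s0 ∨ ∃ p ∈ ps, x = p ∨ x ∈ obtener_ancestros g n p := by
  induction ps generalizing s0 with
  | nil => simp
  | cons p t ih =>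
    simp only [List.foldl_cons, ih, PySem.Set.mem_union, PySem.Set.mem_add, List.mem_cons]
    aesop

theorem pv_memA_succ (g : List (Int × List Int)) (n : Nat) (id x : Int) :
    x ∈ obtener_ancestros g (n + 1) id ↔
      ∃ p ∈ pvPar g id, x = p ∨ x ∈ obtener_ancestros g n p := by
  show x ∈ (if (PySem.Dict.mk g).contains id then _ else _) ↔ _
  by_cases h : (PySem.Dict.mk g).contains id
  · rw [if_pos h, pv_mem_foldl_union_add]
    simp [pvPar, PySem.Set.empty]
  · rw [if_neg h]
    have : pvPar g id = [] := PySem.Dict.getD_of_not_contains _ _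
      (by revert h; cases h2 : (PySem.Dict.mk g).contains id <;> simp)
    simp [this, PySem.Set.empty]

theorem pv_memA3 (g : List (Int × List Int)) (id x : Int) :
    x ∈ obtener_ancestros g 3 id ↔
      ∃ p1 ∈ pvPar g id, x = p1 ∨ ∃ p2 ∈ pvPar g p1, x = p2 ∨ ∃ p3 ∈ pvPar g p2, x = p3 := by
  rw [show (3:Nat) = 2+1 from rfl, pv_memA_succ]
  constructor
  · rintro ⟨p1, hp1, h | h⟩
    · exact ⟨p1, hp1, Or.inl h⟩
    · rw [show (2:Nat) = 1+1 from rfl, pv_memA_succ] at h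
      obtain ⟨p2, hp2, h | h⟩ := h
      · exact ⟨p1, hp1, Or.inr ⟨p2, hp2, Or.inl h⟩⟩
      · rw [show (1:Nat) = 0+1 from rfl, pv_memA_succ] at h
        obtain ⟨p3, hp3, h | h⟩ := h
        · exact ⟨p1, hp1, Or.inr ⟨p2, hp2, Or.inr ⟨p3, hp3, h⟩⟩⟩
        · simp [obtener_ancestros, PySem.Set.empty] at h
  · rintro ⟨p1, hp1, h | ⟨p2, hp2, h | ⟨p3, hp3, h⟩⟩⟩
    · exact ⟨p1, hp1, Or.inl h⟩
    · refine ⟨p1, hp1, Or.inr ?_⟩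
      rw [show (2:Nat) = 1+1 from rfl, pv_memA_succ]
      exact ⟨p2, hp2, Or.inl h⟩
    · refine ⟨p1, hp1, Or.inr ?_⟩
      rw [show (2:Nat) = 1+1 from rfl, pv_memA_succ]
      refine ⟨p2, hp2, Or.inr ?_⟩
      rw [show (1:Nat) = 0+1 from rfl, pv_memA_succ]
      exact ⟨p3, hp3, Or.inl h⟩

theorem pv_memB (g : List (Int × List Int)) (id x : Int) :
    x ∈ ancestros3_alt g id ↔
      x ∈ pvPar g id ∨ (∃ a ∈ pvPar g id, x ∈ pvPar g a) ∨
        ∃ a ∈ pvPar g id, ∃ b ∈ pvPar g a, x ∈ pvPar g b := by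
  unfold ancestros3_alt
  rw [show List.range 3 = [0,1,2] from rfl]
  simp only [List.foldl_cons, List.foldl_nil,
    PySem.List.foldl_prod_mk (f := fun s f => PySem.Set.add s f)
      (g := fun a f => a ++ (PySem.Dict.mk g).getD f []),
    PySem.List.foldl_append_eq_flatMap, List.nil_append,
    PySem.Set.mem_foldl_add (f := fun (x : Int) => x)]
  simp only [List.mem_flatMap, PySem.Set.empty, List.not_mem_nil, false_or, pvPar]
  aesop

theorem pv_mem_anc_iff (g : List (Int × List Int)) (id x : Int) :
    x ∈ obtener_ancestros g 3 id ↔ x ∈ ancestros3_alt g id := by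
  rw [pv_memA3, pv_memB]
  constructor
  · rintro ⟨p1, h1, rfl | ⟨p2, h2, rfl | ⟨p3, h3, rfl⟩⟩⟩
    · exact Or.inl h1
    · exact Or.inr (Or.inl ⟨p1, h1, h2⟩)
    · exact Or.inr (Or.inr ⟨p1, h1, p2, h2, h3⟩)
  · aesop

theorem pv_memo_get? (l : List (List Int × Int)) (g : List (Int × List Int))
    (d : PySem.Dict Int (PySem.Set Int)) (k : Int)
    (hk : k ∈ l.map (·.2) ∨ PySem.Dict.get? d k = some (ancestros3_alt g k)) :
    PySem.Dict.get? (l.foldl (fun d ind => PySem.Dict.insert d ind.2 (ancestros3_alt g ind.2)) d) k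
      = some (ancestros3_alt g k) := by
  induction l generalizing d with
  | nil => simpa using hk.elim (by simp) id
  | cons a t ih =>
    simp only [List.foldl_cons]
    apply ih
    by_cases h : k = a.2
    · subst h; right; exact PySem.Dict.get?_insert_self d _ _
    · rcases hk with hm | hd
      · simp only [List.map_cons, List.mem_cons] at hm
        rcases hm with h' | h'
        · exact absurd h' h
        · exact Or.inl h'
      · right; rw [PySem.Dict.get?_insert_of_ne d _ h]; exact hd

theorem pv_fam_eq (population : List (List Int × Int)) (g : List (Int × List Int))
    (ind1 ind2 : List Int × Int)
    (h1 : ind1.2 ∈ population.map (·.2)) (h2 : ind2.2 ∈ population.map (·.2)) :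
    son_familiares ind1 ind2 g =
      familiares_alt (population.foldl
        (fun d ind => PySem.Dict.insert d ind.2 (ancestros3_alt g ind.2)) PySem.Dict.empty)
        ind1 ind2 := by
  unfold son_familiares familiares_alt
  by_cases he : ind1.2 = ind2.2
  · simp [he]
  · have hb : (ind1.2 == ind2.2) = false := by simp [he]
    rw [if_neg (by simp [he]), hb, Bool.false_or]
    have g1 : PySem.Dict.getD (population.foldl
        (fun d ind => PySem.Dict.insert d ind.2 (ancestros3_alt g ind.2)) PySem.Dict.empty)
        ind1.2 [] = ancestros3_alt g ind1.2 := by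
      rw [PySem.Dict.getD_eq_get?_getD, pv_memo_get? population g _ _ (Or.inl h1)]
      rfl
    have g2 : PySem.Dict.getD (population.foldl
        (fun d ind => PySem.Dict.insert d ind.2 (ancestros3_alt g ind.2)) PySem.Dict.empty)
        ind2.2 [] = ancestros3_alt g ind2.2 := by
      rw [PySem.Dict.getD_eq_get?_getD, pv_memo_get? population g _ _ (Or.inl h2)]
      rfl
    rw [g1, g2, Bool.eq_iff_iff]
    simp only [decide_eq_true_eq, PySem.List.len_eq, List.any_eq_true,
      PySem.Set.contains_iff]
    rw [show ((0:Int) < ((PySem.Set.inter (obtener_ancestros g 3 ind1.2)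
      (obtener_ancestros g 3 ind2.2)).length : Int)) ↔
      0 < (PySem.Set.inter (obtener_ancestros g 3 ind1.2)
        (obtener_ancestros g 3 ind2.2)).length from by exact_mod_cast Iff.rfl]
    rw [List.length_pos_iff_exists_mem]
    constructor
    · rintro ⟨y, hy⟩
      rw [PySem.Set.mem_inter] at hy
      exact ⟨y, (pv_mem_anc_iff g ind1.2 y).mp hy.1, (pv_mem_anc_iff g ind2.2 y).mp hy.2⟩
    · rintro ⟨y, hy1, hy2⟩
      exact ⟨y, (PySem.Set.mem_inter _ _ y).mpr
        ⟨(pv_mem_anc_iff g ind1.2 y).mpr hy1, (pv_mem_anc_iff g ind2.2 y).mpr hy2⟩⟩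

theorem pv_chunk2_mem {α : Type} (l : List α) (p : α × α) (hp : p ∈ chunk2 l) :
    p.1 ∈ l ∧ p.2 ∈ l := by
  fun_induction chunk2 l with
  | case1 a b t ih =>
    rcases List.mem_cons.mp hp with h | h
    · subst h; simp
    · have := ih h; simp [this.1, this.2]
  | case2 l h1 => simp at hp

theorem pv_range2_shift (m : Nat) :
    PySem.List.pyRange 0 ((m : Int) + 2) 2 = 0 :: (PySem.List.pyRange 0 (m : Int) 2).map (· + 2) := by
  rw [PySem.List.pyRange_of_pos _ _ (by norm_num), PySem.List.pyRange_of_pos _ _ (by norm_num)]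
  rcases Nat.eq_zero_or_pos m with hm | hm
  · subst hm; decide
  · rw [if_pos (by positivity), if_pos (by exact_mod_cast hm)]
    have e1 : (((m:Int) + 2 - 0 + 2 - 1) / 2).toNat = ((((m:Int) - 0 + 2 - 1) / 2).toNat) + 1 := by
      omega
    rw [e1, List.range_succ_eq_map]
    simp only [List.map_cons, List.map_map, Nat.cast_zero, mul_zero, add_zero]
    congr 1

theorem pv_pairs_eq (l : List (List Int × Int))
    (init : List ((List Int × Int) × (List Int × Int))) :
    (PySem.List.pyRange 0 (PySem.List.len l) 2).foldl
      (fun parejas i =>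
        if i + 1 < PySem.List.len l then
          parejas ++ [(PySem.List.pyGetD l i ([], 0), PySem.List.pyGetD l (i + 1) ([], 0))]
        else parejas) init = init ++ chunk2 l := by
  match l with
  | [] => simp [chunk2, show PySem.List.pyRange 0 0 2 = ([] : List Int) from by decide]
  | [a] =>
    have h1 : PySem.List.len [a] = (1:Int) := by simp [PySem.List.len_eq]
    rw [h1, show PySem.List.pyRange 0 1 2 = [0] from by decide]
    norm_num [chunk2]
  | a :: b :: t =>
    have hlen : PySem.List.len (a :: b :: t) = (t.length : Int) + 2 := by
      simp [PySem.List.len_eq]; ring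
    rw [hlen, pv_range2_shift t.length]
    simp only [List.foldl_cons]
    rw [if_pos (by omega : (0:Int) + 1 < (t.length:Int) + 2)]
    rw [PySem.List.pyGetD_eq_getElem _ _ (by norm_num) (by simp only [List.length_cons]; push_cast; omega),
        PySem.List.pyGetD_eq_getElem _ _ (by norm_num) (by simp only [List.length_cons]; push_cast; omega)]
    norm_num
    rw [List.foldl_map]
    rw [PySem.List.foldl_congr_mem _ _
      (fun parejas i =>
        if i + 1 < PySem.List.len t then
          parejas ++ [(PySem.List.pyGetD t i ([], 0), PySem.List.pyGetD t (i + 1) ([], 0))]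
        else parejas) _ ?_]
    · rw [← PySem.List.len_eq t, pv_pairs_eq t (init ++ [(a, b)])]
      simp [chunk2]
    · intro acc x hx
      beta_reduce
      rw [PySem.List.mem_pyRange_iff_of_pos (by norm_num : (0:Int) < 2)] at hx
      obtain ⟨hx0, hx1, -⟩ := hx
      by_cases h : x + 1 < (t.length : Int)
      · rw [if_pos (by omega), if_pos (by rw [PySem.List.len_eq]; omega)]
        have e2 : (x + 2).toNat = x.toNat + 2 := by omega
        have e3 : (x + 2 + 1).toNat = x.toNat + 3 := by omega
        have e4 : (x + 1).toNat = x.toNat + 1 := by omega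
        rw [PySem.List.pyGetD_eq_getElem _ _ (by omega) (by simp only [List.length_cons]; push_cast; omega),
            PySem.List.pyGetD_eq_getElem _ _ (by omega) (by simp only [List.length_cons]; push_cast; omega),
            PySem.List.pyGetD_eq_getElem _ _ (by omega) (by omega),
            PySem.List.pyGetD_eq_getElem _ _ (by omega) (by omega)]
        simp [e2, e3, e4]
      · rw [if_neg (by omega), if_neg (by rw [PySem.List.len_eq]; omega)]

theorem pv_enum_fold {α σ : Type} (l : List α) (F : σ → α → σ) (init : σ) :
    (PySem.List.enumerate l 0).foldl (fun st ip => F st ip.2) init = l.foldl F init := by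
  rw [← List.foldl_map, PySem.List.map_snd_enumerate]

theorem pv_bool3 (f c1 c2 : Bool) : ((!f && !c1) && !c2) = ((!c1 && !c2) && !f) := by
  cases f <;> cases c1 <;> cases c2 <;> rfl

theorem pv_buscar_eq (population : List (List Int × Int)) (g : List (Int × List Int))
    (usados : PySem.Set Int) (i : Int)
    (hi : PySem.List.pyGetD population i ([], 0) ∈ population)
    (dl : List Int) (hdl : ∀ j ∈ dl, PySem.List.pyGetD population j ([], 0) ∈ population) :
    buscar_pareja_A population g usados i dl =
      dl.find? (fun j => !(PySem.Set.contains usados j) && j != i &&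
        !(familiares_alt (population.foldl
            (fun d ind => PySem.Dict.insert d ind.2 (ancestros3_alt g ind.2)) PySem.Dict.empty)
          (PySem.List.pyGetD population i ([], 0)) (PySem.List.pyGetD population j ([], 0)))) := by
  induction dl with
  | nil => rfl
  | cons j rest ih =>
    have hj : PySem.List.pyGetD population j ([], 0) ∈ population := hdl j (by simp)
    have hrest : ∀ j ∈ rest, PySem.List.pyGetD population j ([], 0) ∈ population :=
      fun j hjm => hdl j (by simp [hjm])
    have hfam : son_familiares (PySem.List.pyGetD population i ([], 0))
        (PySem.List.pyGetD population j ([], 0)) g =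
        familiares_alt (population.foldl
            (fun d ind => PySem.Dict.insert d ind.2 (ancestros3_alt g ind.2)) PySem.Dict.empty)
          (PySem.List.pyGetD population i ([], 0)) (PySem.List.pyGetD population j ([], 0)) :=
      pv_fam_eq population g _ _ (List.mem_map_of_mem hi) (List.mem_map_of_mem hj)
    unfold buscar_pareja_A
    by_cases hc : PySem.Set.contains usados j = true
    · rw [if_pos (by simp only [hc, Bool.true_or]),
          List.find?_cons_of_neg (by simp only [hc, Bool.not_true, Bool.false_and]; simp)]
      exact ih hrest
    · have hcf : PySem.Set.contains usados j = false := by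
        revert hc; cases PySem.Set.contains usados j <;> simp
      by_cases hij : i = j
      · rw [if_pos (by simp only [show (i == j) = true from by simp [hij], Bool.or_true]),
            List.find?_cons_of_neg (by simp only [show (j != i) = false from by simp [hij],
              Bool.and_false, Bool.false_and]; simp)]
        exact ih hrest
      · rw [if_neg (by simp only [hcf, show (i == j) = false from by simp [hij], Bool.false_or]; simp)]
        by_cases hf : familiares_alt (population.foldl
            (fun d ind => PySem.Dict.insert d ind.2 (ancestros3_alt g ind.2)) PySem.Dict.empty)
          (PySem.List.pyGetD population i ([], 0)) (PySem.List.pyGetD population j ([], 0)) = true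
        · rw [if_neg (by rw [hfam]; simp only [hf, Bool.not_true]; simp),
              List.find?_cons_of_neg (by simp only [hf, Bool.not_true, Bool.and_false]; simp)]
          exact ih hrest
        · have hff : familiares_alt (population.foldl
              (fun d ind => PySem.Dict.insert d ind.2 (ancestros3_alt g ind.2)) PySem.Dict.empty)
            (PySem.List.pyGetD population i ([], 0)) (PySem.List.pyGetD population j ([], 0)) = false := by
            revert hf; cases familiares_alt _ _ _ <;> simp
          rw [if_pos (by rw [hfam]; simp only [hff, Bool.not_false]),
              List.find?_cons_of_pos (by simp only [hff, hcf, Bool.not_false, Bool.true_and,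
                Bool.and_true, show (j != i) = true from by simp [Ne.symm hij]])]

-- ===== VERDICT (by name: the statement is the Claim_ definition above) =====
theorem formar_parejas_spec : Claim_equal_formar_parejas := by
  intro population genealogia _h
  show formar_parejas population genealogia = formar_parejas_alt population genealogia
  unfold formar_parejas formar_parejas_alt seleccionar_mejores_padres
  simp only []
  rw [pv_pairs_eq, List.nil_append]
  set S := PySem.List.slice (PySem.List.sorted2 population (fun ind => ind.1.sum)
      (fun ind => (PySem.List.count ind.1 9 : Int)) true) none
      (some (PySem.Int.floordiv (PySem.List.len population) 2 * 2)) with hS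
  rw [pv_enum_fold (chunk2 S)
      (fun (st : List ((List Int × Int) × (List Int × Int)) × PySem.Set Int) p =>
        if !(son_familiares p.1 p.2 genealogia) &&
            !(PySem.Set.contains st.2 ((PySem.List.index? population p.1).getD 0 : Nat)) &&
            !(PySem.Set.contains st.2 ((PySem.List.index? population p.2).getD 0 : Nat)) then
          (st.1 ++ [(p.1, p.2)],
            PySem.Set.add (PySem.Set.add st.2 ((PySem.List.index? population p.1).getD 0 : Nat))
              ((PySem.List.index? population p.2).getD 0 : Nat))
        else st)
      ([], PySem.Set.empty)]
  have hSmem : ∀ x ∈ S, x ∈ population := by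
    intro x hx
    rw [hS] at hx
    exact ((PySem.List.sorted2_perm population _ _ true).mem_iff).mp
      (PySem.List.mem_of_mem_slice _ _ _ hx)
  have hPmem : ∀ p ∈ chunk2 S, p.1 ∈ population ∧ p.2 ∈ population := by
    intro p hp
    obtain ⟨h1, h2⟩ := pv_chunk2_mem S p hp
    exact ⟨hSmem _ h1, hSmem _ h2⟩
  rw [PySem.List.foldl_congr_mem (chunk2 S)
      (fun (st : List ((List Int × Int) × (List Int × Int)) × PySem.Set Int) p =>
        if !(son_familiares p.1 p.2 genealogia) &&
            !(PySem.Set.contains st.2 ((PySem.List.index? population p.1).getD 0 : Nat)) &&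
            !(PySem.Set.contains st.2 ((PySem.List.index? population p.2).getD 0 : Nat)) then
          (st.1 ++ [(p.1, p.2)],
            PySem.Set.add (PySem.Set.add st.2 ((PySem.List.index? population p.1).getD 0 : Nat))
              ((PySem.List.index? population p.2).getD 0 : Nat))
        else st)
      (fun (st : List ((List Int × Int) × (List Int × Int)) × PySem.Set Int) p =>
        if !(PySem.Set.contains st.2 ((PySem.List.index? population p.1).getD 0 : Nat)) &&
            !(PySem.Set.contains st.2 ((PySem.List.index? population p.2).getD 0 : Nat)) &&
            !(familiares_alt (population.foldl
                (fun d ind => PySem.Dict.insert d ind.2 (ancestros3_alt genealogia ind.2))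
                PySem.Dict.empty) p.1 p.2) then
          (st.1 ++ [p],
            PySem.Set.add (PySem.Set.add st.2 ((PySem.List.index? population p.1).getD 0 : Nat))
              ((PySem.List.index? population p.2).getD 0 : Nat))
        else st)
      ([], PySem.Set.empty) ?_]
  · set P := List.foldl
      (fun (st : List ((List Int × Int) × (List Int × Int)) × PySem.Set Int) p =>
        if !(PySem.Set.contains st.2 ((PySem.List.index? population p.1).getD 0 : Nat)) &&
            !(PySem.Set.contains st.2 ((PySem.List.index? population p.2).getD 0 : Nat)) &&
            !(familiares_alt (population.foldl
                (fun d ind => PySem.Dict.insert d ind.2 (ancestros3_alt genealogia ind.2))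
                PySem.Dict.empty) p.1 p.2) then
          (st.1 ++ [p],
            PySem.Set.add (PySem.Set.add st.2 ((PySem.List.index? population p.1).getD 0 : Nat))
              ((PySem.List.index? population p.2).getD 0 : Nat))
        else st)
      ([], PySem.Set.empty) (chunk2 S) with hP
    set D := List.filter (fun i => !(PySem.Set.contains P.2 i))
      (PySem.List.pyRange 0 (PySem.List.len population) 1) with hD
    have hDb : ∀ j ∈ D, PySem.List.pyGetD population j ([], 0) ∈ population := by
      intro j hj
      rw [hD] at hj
      have hr := (List.mem_filter.mp hj).1
      rw [PySem.List.mem_pyRange_one] at hr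
      refine PySem.List.pyGetD_mem _ _ ?_
      rw [PySem.List.len_eq] at hr
      exact ⟨by omega, hr.2⟩
    rw [PySem.List.foldl_congr_mem D
      (fun (st : List ((List Int × Int) × (List Int × Int)) × PySem.Set Int) i =>
        if PySem.Set.contains st.2 i then st
        else
          match buscar_pareja_A population genealogia st.2 i D with
          | some j =>
            (st.1 ++ [(PySem.List.pyGetD population i ([], 0), PySem.List.pyGetD population j ([], 0))],
             PySem.Set.add (PySem.Set.add st.2 i) j)
          | none => st)
      (fun (st : List ((List Int × Int) × (List Int × Int)) × PySem.Set Int) i =>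
        if PySem.Set.contains st.2 i then st
        else
          match D.find? (fun j => !(PySem.Set.contains st.2 j) && j != i &&
              !(familiares_alt (population.foldl
                  (fun d ind => PySem.Dict.insert d ind.2 (ancestros3_alt genealogia ind.2))
                  PySem.Dict.empty)
                (PySem.List.pyGetD population i ([], 0)) (PySem.List.pyGetD population j ([], 0)))) with
          | some j =>
            (st.1 ++ [(PySem.List.pyGetD population i ([], 0), PySem.List.pyGetD population j ([], 0))],
             PySem.Set.add (PySem.Set.add st.2 i) j)
          | none => st)
      P ?_]
    intro acc i hi
    beta_reduce
    by_cases hc : PySem.Set.contains acc.2 i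
    · rw [if_pos hc, if_pos hc]
    · rw [if_neg hc, if_neg hc,
        pv_buscar_eq population genealogia acc.2 i (hDb i hi) D hDb]
  · intro acc p hp
    beta_reduce
    obtain ⟨h1, h2⟩ := hPmem p hp
    rw [pv_fam_eq population genealogia p.1 p.2 (List.mem_map_of_mem h1) (List.mem_map_of_mem h2),
        pv_bool3]
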